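-- pv_equiv track=rewrite | github.com/cry999/AtCoder | beginner/015/D.py | distress
-- ===== SOURCE A (Python) =====
-- def distress(W: int, N: int, K: int, screenshots: list)->int:
--     dp = [[0] * (W+1) for _ in range(K+1)]
--
--     for width, priority in screenshots:
--         for k in range(K, 0, -1):
--             for w in range(W, -1, -1):
--                 if width <= w:
--                     dp[k][w] = max(dp[k][w], dp[k-1][w-width]+priority)
--     return dp[K][W]
-- ===== SOURCE B (Python) =====
-- def distress(W: int, N: int, K: int, screenshots: list) -> int:
--     # Top-down memoized recursion: best(i, k, w) = maximum total priority
--     # achievable using only the first i screenshots, taking at most k of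
--     # them with total width at most w.
--     memo = {}
--     def best(i, k, w):
--         if i == 0 or k == 0:
--             return 0
--         key = (i, k, w)
--         if key in memo:
--             return memo[key]
--         width, priority = screenshots[i - 1]
--         res = best(i - 1, k, w)
--         if width <= w:
--             cand = priority + best(i - 1, k - 1, w - width)
--             if cand > res:
--                 res = cand
--         memo[key] = res
--         return res
--     return best(len(screenshots), K, W)
-- ===== Notes on version B (the rewrite author's own statement) =====
-- stated objective: faster
-- what changed: Replaces the in-place reverse-swept dense (K+1)x(W+1) DP table with top-down memoized recursion best(i,k,w) over the item prefix, which evaluates only reachable (i,k,w) states instead of sweeping every table cell for every item.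
import Mathlib
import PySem

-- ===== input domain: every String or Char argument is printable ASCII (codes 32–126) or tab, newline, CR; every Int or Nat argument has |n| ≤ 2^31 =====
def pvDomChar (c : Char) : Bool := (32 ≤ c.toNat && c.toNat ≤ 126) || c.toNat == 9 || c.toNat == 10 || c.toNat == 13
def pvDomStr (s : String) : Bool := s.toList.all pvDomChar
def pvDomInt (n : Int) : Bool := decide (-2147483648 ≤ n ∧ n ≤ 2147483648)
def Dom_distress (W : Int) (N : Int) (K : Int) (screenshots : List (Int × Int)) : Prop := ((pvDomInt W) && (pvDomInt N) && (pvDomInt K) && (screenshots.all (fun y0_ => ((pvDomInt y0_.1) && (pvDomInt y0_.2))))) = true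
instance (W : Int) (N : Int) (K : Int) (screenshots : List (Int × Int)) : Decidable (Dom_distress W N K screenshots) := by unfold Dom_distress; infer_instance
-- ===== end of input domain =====

-- B replaces A's in-place reverse-swept dense DP table by top-down recursion over the
-- item prefix (memoisation in Python is an evaluation cache only); equivalence is
-- proved on Pre_, the inputs where A returns without an IndexError.

-- ===== PORT A =====
-- dp[k][w] (read with Python index semantics; in range on every executed read under Pre_)
def get2 (dp : List (List Int)) (k w : Int) : Int :=
  PySem.List.pyGetD (PySem.List.pyGetD dp k ([] : List Int)) w 0

-- dp[k][w] = v
def set2 (dp : List (List Int)) (k w v : Int) : List (List Int) :=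
  PySem.List.pySetD dp k (PySem.List.pySetD (PySem.List.pyGetD dp k ([] : List Int)) w v)

-- body of the innermost loop: 'if width <= w: dp[k][w] = max(dp[k][w], dp[k-1][w-width]+priority)'
def cellStep (wd p k : Int) (dp : List (List Int)) (w : Int) : List (List Int) :=
  if wd ≤ w then set2 dp k w (max (get2 dp k w) (get2 dp (k-1) (w - wd) + p)) else dp

-- 'for w in range(W, -1, -1): …'
def rowStep (W wd p : Int) (dp : List (List Int)) (k : Int) : List (List Int) :=
  (PySem.List.pyRange W (-1) (-1)).foldl (cellStep wd p k) dp

-- 'for k in range(K, 0, -1): …'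
def itemStep (W K : Int) (dp : List (List Int)) (it : Int × Int) : List (List Int) :=
  (PySem.List.pyRange K 0 (-1)).foldl (rowStep W it.1 it.2) dp

def distress (W : Int) (N : Int) (K : Int) (screenshots : List (Int × Int)) : Int :=
  get2 (screenshots.foldl (itemStep W K)
         (List.replicate (K+1).toNat (List.replicate (W+1).toNat (0:Int)))) K W

-- ===== PORT B =====
-- best(i, k, w) of Source B, with the first-i-items prefix represented by the reversed list
def altGo : List (Int × Int) → Int → Int → Int
  | [], _, _ => 0
  | (width, priority) :: rest, k, w =>
    if k = 0 then 0
    else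
      let res := altGo rest k w
      if width ≤ w then
        let cand := priority + altGo rest (k-1) (w - width)
        if cand > res then cand else res
      else res

def distress_alt (W : Int) (N : Int) (K : Int) (screenshots : List (Int × Int)) : Int :=
  altGo screenshots.reverse K W

-- ===== PRECONDITION & SPEC =====
-- Pre_ excludes exactly the inputs where A raises IndexError: W < 0 or K < 0 (the table
-- has no row/column there), or K ≥ 1 together with a negative-width screenshot
-- (dp[k-1][w-width] indexes past the end of the row).
def Pre_distress (W : Int) (N : Int) (K : Int) (screenshots : List (Int × Int)) : Prop :=
  0 ≤ W ∧ 0 ≤ K ∧ (K = 0 ∨ ∀ x ∈ screenshots, 0 ≤ x.1)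
instance (W : Int) (N : Int) (K : Int) (screenshots : List (Int × Int)) : Decidable (Pre_distress W N K screenshots) := by unfold Pre_distress; infer_instance

def pvWitness_distress : Int × Int × Int × (List (Int × Int)) := (3, 2, 2, [(1, 5), (2, 3)])

def Spec_distress (W : Int) (N : Int) (K : Int) (screenshots : List (Int × Int)) (out : Int) : Prop := out = distress_alt W N K screenshots
instance (W : Int) (N : Int) (K : Int) (screenshots : List (Int × Int)) (out : Int) : Decidable (Spec_distress W N K screenshots out) := by unfold Spec_distress; infer_instance

-- ===== CLAIM (what is proved, stated in full; the proofs are below) =====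
def Claim_equal_distress : Prop := ∀ (W : Int) (N : Int) (K : Int) (screenshots : List (Int × Int)), Dom_distress W N K screenshots → Pre_distress W N K screenshots → Spec_distress W N K screenshots (distress W N K screenshots)

-- ===== LEMMAS AND PROOFS =====

theorem altGo_nil (k w : Int) : altGo [] k w = 0 := rfl

theorem altGo_cons (wd p k w : Int) (rest : List (Int × Int)) :
    altGo ((wd, p) :: rest) k w =
      if k = 0 then 0
      else if wd ≤ w then
        (if p + altGo rest (k-1) (w - wd) > altGo rest k w
         then p + altGo rest (k-1) (w - wd) else altGo rest k w)
      else altGo rest k w := rfl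

theorem altGo_zero (l : List (Int × Int)) (w : Int) : altGo l 0 w = 0 := by
  cases l with
  | nil => rfl
  | cons a t => obtain ⟨wd, p⟩ := a; simp [altGo_cons]

theorem pyGetD_all_zero (row : List Int) (h : ∀ x ∈ row, x = 0) (w : Int) :
    PySem.List.pyGetD row w 0 = 0 := by
  cases hg : PySem.List.pyGet? row w with
  | none => simp [PySem.List.pyGetD, hg]
  | some x =>
      have hx := PySem.List.mem_of_pyGet?_eq_some _ hg
      simp [PySem.List.pyGetD, hg, h x hx]

theorem pyGetD_mem_or_default {α : Type} (dp : List α) (k : Int) (d : α) :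
    PySem.List.pyGetD dp k d ∈ dp ∨ PySem.List.pyGetD dp k d = d := by
  cases hg : PySem.List.pyGet? dp k with
  | none => right; simp [PySem.List.pyGetD, hg]
  | some x =>
      left
      have hx := PySem.List.mem_of_pyGet?_eq_some _ hg
      simpa [PySem.List.pyGetD, hg] using hx

theorem get2_init (m n : Nat) (k w : Int) :
    get2 (List.replicate m (List.replicate n (0:Int))) k w = 0 := by
  unfold get2
  rcases pyGetD_mem_or_default (List.replicate m (List.replicate n (0:Int))) k [] with h | h
  · rw [List.eq_of_mem_replicate h]
    exact pyGetD_all_zero _ (fun x hx => List.eq_of_mem_replicate hx) w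
  · rw [h]
    exact pyGetD_all_zero [] (by simp) w

theorem get2_set2 (dp : List (List Int)) (k w v k' w' : Int)
    (hk0 : 0 ≤ k) (hk : k < (dp.length : Int))
    (hw0 : 0 ≤ w) (hw : w < ((PySem.List.pyGetD dp k ([] : List Int)).length : Int))
    (hk'0 : 0 ≤ k') (hw'0 : 0 ≤ w') :
    get2 (set2 dp k w v) k' w' = if k' = k ∧ w' = w then v else get2 dp k' w' := by
  obtain ⟨kn, rfl⟩ : ∃ kn : Nat, ((kn : Int)) = k := ⟨k.toNat, Int.toNat_of_nonneg hk0⟩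
  obtain ⟨wn, rfl⟩ : ∃ wn : Nat, ((wn : Int)) = w := ⟨w.toNat, Int.toNat_of_nonneg hw0⟩
  obtain ⟨kn', rfl⟩ : ∃ j : Nat, ((j : Int)) = k' := ⟨k'.toNat, Int.toNat_of_nonneg hk'0⟩
  obtain ⟨wn', rfl⟩ : ∃ j : Nat, ((j : Int)) = w' := ⟨w'.toNat, Int.toNat_of_nonneg hw'0⟩
  have hkn : kn < dp.length := by exact_mod_cast hk
  have hwn : wn < (PySem.List.pyGetD dp (kn : Int) ([] : List Int)).length := by exact_mod_cast hw
  unfold get2 set2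
  rw [PySem.List.pyGetD_pySetD_natCast dp kn kn' _ _ hkn]
  by_cases hkk : kn' = kn
  · subst hkk
    rw [if_pos rfl]
    rw [PySem.List.pyGetD_pySetD_natCast _ wn wn' v 0 hwn]
    by_cases hww : wn' = wn
    · subst hww; simp
    · rw [if_neg hww, if_neg (by simpa using hww)]
  · rw [if_neg hkk, if_neg (by simp [hkk])]

theorem length_set2 (dp : List (List Int)) (k w v : Int) :
    (set2 dp k w v).length = dp.length := by
  unfold set2; exact PySem.List.length_pySetD ..

theorem rows_set2 (dp : List (List Int)) (k w v : Int) (L : Nat)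
    (hk0 : 0 ≤ k) (hk : k < (dp.length : Int)) (hrows : ∀ row ∈ dp, row.length = L) :
    ∀ row ∈ set2 dp k w v, row.length = L := by
  intro row hrow
  unfold set2 at hrow
  rw [PySem.List.pySetD_of_nonneg _ _ hk0] at hrow
  rcases List.mem_or_eq_of_mem_set hrow with h | h
  · exact hrows _ h
  · subst h
    rw [PySem.List.length_pySetD]
    cases hg : PySem.List.pyGet? dp k with
    | none =>
        exfalso
        rw [PySem.List.pyGet?_eq_none_iff] at hg
        exact hg (by unfold PySem.Raise.InRange; omega)
    | some r =>
        have := hrows _ (PySem.List.mem_of_pyGet?_eq_some _ hg)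
        simp [PySem.List.pyGetD, hg, this]

-- invariant after processing a (reversed) prefix 'rev' of the screenshots
def DPInv (W K : Int) (rev : List (Int × Int)) (dp : List (List Int)) : Prop :=
  dp.length = (K+1).toNat ∧ (∀ row ∈ dp, row.length = (W+1).toNat) ∧
  ∀ k w : Int, 0 ≤ k → k ≤ K → 0 ≤ w → w ≤ W → get2 dp k w = altGo rev k w

-- during the k-loop of one item: rows above t are updated, rows ≤ t still old
def MixInv (W K wd p : Int) (rev : List (Int × Int)) (t : Int) (dp : List (List Int)) : Prop :=
  dp.length = (K+1).toNat ∧ (∀ row ∈ dp, row.length = (W+1).toNat) ∧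
  ∀ k w : Int, 0 ≤ k → k ≤ K → 0 ≤ w → w ≤ W →
    get2 dp k w = if t < k then altGo ((wd,p)::rev) k w else altGo rev k w

-- during the w-loop of row kk: cells of row kk above u are updated
def RowMix (W K wd p : Int) (rev : List (Int × Int)) (kk u : Int) (dp : List (List Int)) : Prop :=
  dp.length = (K+1).toNat ∧ (∀ row ∈ dp, row.length = (W+1).toNat) ∧
  ∀ k w : Int, 0 ≤ k → k ≤ K → 0 ≤ w → w ≤ W →
    get2 dp k w = if kk < k ∨ (k = kk ∧ u < w) then altGo ((wd,p)::rev) k w else altGo rev k w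

theorem cell_inv (W K wd p : Int) (rev : List (Int × Int)) (kk u : Int)
    (dp : List (List Int))
    (hW : 0 ≤ W) (hK : 0 ≤ K) (hwd : 0 ≤ wd)
    (hkk1 : 1 ≤ kk) (hkkK : kk ≤ K) (hu0 : 0 ≤ u) (huW : u ≤ W)
    (h : RowMix W K wd p rev kk u dp) :
    RowMix W K wd p rev kk (u-1) (cellStep wd p kk dp u) := by
  obtain ⟨hlen, hrows, hent⟩ := h
  by_cases hle : wd ≤ u
  · -- the cell is written
    have hkrange : kk < (dp.length : Int) := by
      rw [hlen]; omega
    have hrowlen : ((PySem.List.pyGetD dp kk ([] : List Int)).length : Int) = W + 1 := by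
      have hmem : PySem.List.pyGetD dp kk ([] : List Int) ∈ dp := by
        apply PySem.List.pyGetD_mem
        unfold PySem.Raise.InRange
        omega
      have := hrows _ hmem
      rw [this]; omega
    have hcur : get2 dp kk u = altGo rev kk u := by
      rw [hent kk u (by omega) hkkK hu0 huW]
      rw [if_neg]; omega
    have hprev : get2 dp (kk-1) (u - wd) = altGo rev (kk-1) (u - wd) := by
      rw [hent (kk-1) (u - wd) (by omega) (by omega) (by omega) (by omega)]
      rw [if_neg]; omega
    have hval : max (get2 dp kk u) (get2 dp (kk-1) (u - wd) + p)
        = altGo ((wd,p)::rev) kk u := by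
      rw [hcur, hprev, altGo_cons, if_neg (by omega : ¬ kk = 0), if_pos hle]
      rw [max_def]
      split_ifs <;> omega
    refine ⟨?_, ?_, ?_⟩
    · simp [cellStep, hle, length_set2, hlen]
    · intro row hrow
      simp only [cellStep, if_pos hle] at hrow
      exact rows_set2 dp kk u _ _ (by omega) hkrange hrows row hrow
    · intro k w hk0 hkK hw0 hwW
      simp only [cellStep, if_pos hle]
      rw [get2_set2 dp kk u _ k w (by omega) hkrange hu0 (by omega) hk0 hw0]
      by_cases hkw : k = kk ∧ w = u
      · obtain ⟨rfl, rfl⟩ := hkw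
        rw [if_pos ⟨rfl, rfl⟩, if_pos (by omega), hval]
      · rw [if_neg hkw, hent k w hk0 hkK hw0 hwW]
        by_cases h1 : kk < k ∨ (k = kk ∧ u < w)
        · rw [if_pos h1, if_pos (by omega)]
        · rw [if_neg h1, if_neg (by omega)]
  · -- width > u: the cell keeps its old value, which is also the updated value
    refine ⟨by simpa [cellStep, hle] using hlen,
            by simpa [cellStep, hle] using hrows, ?_⟩
    intro k w hk0 hkK hw0 hwW
    simp only [cellStep, if_neg hle]
    rw [hent k w hk0 hkK hw0 hwW]
    by_cases hkw : k = kk ∧ w = u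
    · rw [if_neg (by omega), if_pos (by omega), altGo_cons, if_neg (by omega),
          if_neg (by omega)]
    · by_cases h1 : kk < k ∨ (k = kk ∧ u < w)
      · rw [if_pos h1, if_pos (by omega)]
      · rw [if_neg h1, if_neg (by omega)]

theorem wloop_inv (W K wd p : Int) (rev : List (Int × Int)) (kk : Int)
    (hW : 0 ≤ W) (hK : 0 ≤ K) (hwd : 0 ≤ wd) (hkk1 : 1 ≤ kk) (hkkK : kk ≤ K) :
    ∀ (m : Nat) (dp : List (List Int)), (m : Int) - 1 ≤ W →
    RowMix W K wd p rev kk ((m : Int) - 1) dp →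
    RowMix W K wd p rev kk (-1)
      ((PySem.List.pyRange ((m : Int) - 1) (-1) (-1)).foldl (cellStep wd p kk) dp) := by
  intro m
  induction m with
  | zero =>
      intro dp _ h
      rw [PySem.List.pyRange_neg_one_eq_nil (by omega)]
      simpa using h
  | succ n ih =>
      intro dp hm h
      have hcast : ((n + 1 : Nat) : Int) - 1 = (n : Int) := by push_cast; omega
      rw [hcast] at h hm ⊢
      rw [PySem.List.pyRange_neg_one_cons (by omega)]
      simp only [List.foldl_cons]
      have h' := cell_inv W K wd p rev kk (n : Int) dp hW hK hwd hkk1 hkkK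
        (by omega) (by omega) (by simpa using h)
      have := ih (cellStep wd p kk dp (n : Int)) (by omega) (by simpa using h')
      simpa using this

theorem kloop_inv (W K wd p : Int) (rev : List (Int × Int))
    (hW : 0 ≤ W) (hK : 0 ≤ K) (hwd : 0 ≤ wd) :
    ∀ (n : Nat) (dp : List (List Int)), (n : Int) ≤ K →
    MixInv W K wd p rev (n : Int) dp →
    MixInv W K wd p rev 0
      ((PySem.List.pyRange (n : Int) 0 (-1)).foldl (rowStep W wd p) dp) := by
  intro n
  induction n with
  | zero =>
      intro dp _ h
      rw [PySem.List.pyRange_neg_one_eq_nil (by omega)]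
      simpa using h
  | succ m ih =>
      intro dp hn hmix
      push_cast at hn hmix ⊢
      rw [PySem.List.pyRange_neg_one_cons (by omega)]
      simp only [List.foldl_cons, add_sub_cancel_right]
      obtain ⟨hlen, hrows, hent⟩ := hmix
      have hrm : RowMix W K wd p rev ((m : Int) + 1) W dp := by
        refine ⟨hlen, hrows, ?_⟩
        intro k w hk0 hkK hw0 hwW
        rw [hent k w hk0 hkK hw0 hwW]
        by_cases h1 : (m : Int) + 1 < k
        · rw [if_pos h1, if_pos (by omega)]
        · rw [if_neg h1, if_neg (by omega)]
      have hW1 : ((W + 1).toNat : Int) - 1 = W := by omega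
      have hrm' : RowMix W K wd p rev ((m : Int) + 1) (-1)
          (rowStep W wd p dp ((m : Int) + 1)) := by
        unfold rowStep
        have := wloop_inv W K wd p rev ((m : Int) + 1) hW hK hwd (by omega)
          (by omega) (W + 1).toNat dp (by omega) (by rw [hW1]; exact hrm)
        rw [hW1] at this
        exact this
      obtain ⟨hlen', hrows', hent'⟩ := hrm'
      have hmix' : MixInv W K wd p rev (m : Int) (rowStep W wd p dp ((m : Int) + 1)) := by
        refine ⟨hlen', hrows', ?_⟩
        intro k w hk0 hkK hw0 hwW
        rw [hent' k w hk0 hkK hw0 hwW]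
        by_cases h1 : (m : Int) + 1 < k ∨ (k = (m : Int) + 1 ∧ -1 < w)
        · rw [if_pos h1, if_pos (by omega)]
        · rw [if_neg h1, if_neg (by omega)]
      exact ih (rowStep W wd p dp ((m : Int) + 1)) (by omega) hmix'

theorem item_inv (W K wd p : Int) (rev : List (Int × Int)) (dp : List (List Int))
    (hW : 0 ≤ W) (hK : 0 ≤ K) (hwd : 0 ≤ wd)
    (h : DPInv W K rev dp) :
    DPInv W K ((wd, p) :: rev) (itemStep W K dp (wd, p)) := by
  simp only [itemStep]
  obtain ⟨hlen, hrows, hent⟩ := h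
  have hmix : MixInv W K wd p rev K dp := by
    refine ⟨hlen, hrows, ?_⟩
    intro k w hk0 hkK hw0 hwW
    rw [hent k w hk0 hkK hw0 hwW, if_neg (by omega)]
  have hKc : ((K.toNat : Nat) : Int) = K := Int.toNat_of_nonneg hK
  have := kloop_inv W K wd p rev hW hK hwd K.toNat dp (by omega) (by rw [hKc]; exact hmix)
  rw [hKc] at this
  obtain ⟨hlen', hrows', hent'⟩ := this
  refine ⟨hlen', hrows', ?_⟩
  intro k w hk0 hkK hw0 hwW
  rw [hent' k w hk0 hkK hw0 hwW]
  by_cases h1 : 0 < k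
  · rw [if_pos h1]
  · rw [if_neg h1]
    have hk : k = 0 := by omega
    subst hk
    rw [altGo_zero, altGo_zero]

theorem foldl_inv (W K : Int) (hW : 0 ≤ W) (hK : 0 ≤ K) :
    ∀ (items : List (Int × Int)) (rev : List (Int × Int)) (dp : List (List Int)),
    (∀ x ∈ items, 0 ≤ x.1) → DPInv W K rev dp →
    DPInv W K (items.reverse ++ rev) (items.foldl (itemStep W K) dp) := by
  intro items
  induction items with
  | nil => intro rev dp _ h; simpa using h
  | cons x t ih =>
      intro rev dp hnn h
      obtain ⟨wd, p⟩ := x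
      have h1 := item_inv W K wd p rev dp hW hK (hnn (wd, p) (by simp)) h
      have := ih ((wd, p) :: rev) (itemStep W K dp (wd, p))
        (fun y hy => hnn y (by simp [hy])) h1
      simpa using this

theorem dpinv_init (W K : Int) :
    DPInv W K [] (List.replicate (K+1).toNat (List.replicate (W+1).toNat (0:Int))) := by
  refine ⟨by simp, ?_, ?_⟩
  · intro row hrow
    rw [List.eq_of_mem_replicate hrow]; simp
  · intro k w _ _ _ _
    rw [get2_init, altGo_nil]

theorem itemStep_zero (W : Int) (dp : List (List Int)) (it : Int × Int) :
    itemStep W 0 dp it = dp := by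
  unfold itemStep
  rw [PySem.List.pyRange_neg_one_eq_nil (by omega)]
  rfl

theorem foldl_itemStep_zero (W : Int) (l : List (Int × Int)) (dp : List (List Int)) :
    l.foldl (itemStep W 0) dp = dp := by
  induction l generalizing dp with
  | nil => rfl
  | cons x t ih => rw [List.foldl_cons, itemStep_zero]; exact ih dp

-- ===== VERDICT (by name: the statement is the Claim_ definition above) =====
theorem distress_spec : Claim_equal_distress := by
  intro W N K s _ hPre
  obtain ⟨hW, hK, hcase⟩ := hPre
  unfold Spec_distress distress distress_alt
  rcases hcase with hK0 | hwd
  · subst hK0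
    rw [foldl_itemStep_zero, get2_init, altGo_zero]
  · have h0 := dpinv_init W K
    have h := foldl_inv W K hW hK s [] _ hwd h0
    obtain ⟨_, _, hent⟩ := h
    rw [hent K W hK le_rfl hW le_rfl]
    simp
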